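-- pv_equiv track=rewrite | github.com/Helenlin305/vuln_matching | regex_diff.py | get_matched_obj
-- ===== SOURCE A (Python) =====
-- import difflib
--
-- def get_matched_obj(a, b, i_idx, j_idx, a_start=0, b_start=0):
--     s = difflib.SequenceMatcher(None, a, b)
--
--     match_obj = s.get_matching_blocks()
--     final_obj = []
--     for i, j, size in match_obj:
--         matched = a[i: i+size]
--         if size == 0:
--             final_obj.append((a_start+i, b_start+j, size, matched))
--             return final_obj
--         if in_regex(a_start+i, size, i_idx) or in_regex(b_start+j, size, j_idx):
--             continue
--         if matched == "\\":
--             continue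
--         if matched[-1] == "\\" and not (i+size == len(a) or j+size == len(b)):
--             matched = matched[:-1]
--             size -= 1
--             while size > 0 and matched[-1] == "\\":
--                 matched = matched[:-1]
--                 size -= 1
--             if size > 2:
--                 final_obj.append((a_start+i, b_start+j, size, matched))
--             final_obj.extend(get_matched_obj(a[i+size:], b[j+size:], i_idx, j_idx, i+size+a_start, j+size+b_start))
--             break
--         if size > 2:
--             final_obj.append((a_start+i, b_start+j, size, matched))
--
--     return final_obj
--
-- def in_regex(idx, size, var_idx):
--     cur_set = set(range(idx, idx + size))
--     for beg, end in var_idx: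
--         tmp_set = set(range(beg, end))
--         same = tmp_set & cur_set
--         if same and same != tmp_set:
--             return True
--     return False
-- ===== SOURCE B (Python) =====
-- def _matching_blocks(a, b):
--     # Same matching blocks as difflib.SequenceMatcher(None, a, b).get_matching_blocks()
--     # (isjunk=None, autojunk on), re-implemented without the library.
--     b2j = {}
--     for idx, ch in enumerate(b):
--         b2j.setdefault(ch, []).append(idx)
--     n = len(b)
--     if n >= 200:
--         thr = n // 100 + 1
--         b2j = {ch: js for ch, js in b2j.items() if len(js) <= thr}
--
--     def longest(alo, ahi, blo, bhi):
--         bi, bj, bk = alo, blo, 0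
--         row = {}
--         for i in range(alo, ahi):
--             new = {}
--             for j in b2j.get(a[i], ()):
--                 if j < blo:
--                     continue
--                 if j >= bhi:
--                     break
--                 k = new[j] = row.get(j - 1, 0) + 1
--                 if k > bk:
--                     bi, bj, bk = i - k + 1, j - k + 1, k
--             row = new
--         while bi > alo and bj > blo and a[bi - 1] == b[bj - 1]:
--             bi, bj, bk = bi - 1, bj - 1, bk + 1
--         while bi + bk < ahi and bj + bk < bhi and a[bi + bk] == b[bj + bk]:
--             bk += 1
--         return bi, bj, bk
--
--     found = []
--     stack = [(0, len(a), 0, n)]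
--     while stack:
--         alo, ahi, blo, bhi = stack.pop()
--         i, j, k = longest(alo, ahi, blo, bhi)
--         if k:
--             found.append((i, j, k))
--             if alo < i and blo < j:
--                 stack.append((alo, i, blo, j))
--             if i + k < ahi and j + k < bhi:
--                 stack.append((i + k, ahi, j + k, bhi))
--     found.sort()
--     merged = []
--     i1 = j1 = k1 = 0
--     for i2, j2, k2 in found:
--         if i1 + k1 == i2 and j1 + k1 == j2:
--             k1 += k2
--         else:
--             if k1:
--                 merged.append((i1, j1, k1))
--             i1, j1, k1 = i2, j2, k2
--     if k1:
--         merged.append((i1, j1, k1))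
--     merged.append((len(a), n, 0))
--     return merged
--
-- def _cut_by_region(idx, size, var_idx):
--     # (beg, end) partially overlaps [idx, idx+size): they intersect but
--     # (beg, end) is not wholly contained in it.
--     for beg, end in var_idx:
--         if max(beg, idx) < min(end, idx + size) and not (idx <= beg and end <= idx + size):
--             return True
--     return False
--
-- def get_matched_obj(a, b, i_idx, j_idx, a_start=0, b_start=0):
--     # Iterative version: an outer loop replaces A's tail recursion; the
--     # backslash stripping is a single rstrip; region overlap is tested
--     # arithmetically instead of materialising integer sets.
--     final_obj = []
--     while True:
--         restarted = False
--         for i, j, size in _matching_blocks(a, b):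
--             if size == 0:
--                 final_obj.append((a_start + i, b_start + j, 0, ""))
--                 return final_obj
--             if _cut_by_region(a_start + i, size, i_idx) or _cut_by_region(b_start + j, size, j_idx):
--                 continue
--             matched = a[i:i + size]
--             if matched == "\\":
--                 continue
--             if matched[-1] == "\\" and not (i + size == len(a) or j + size == len(b)):
--                 matched = matched.rstrip("\\")
--                 size = len(matched)
--                 if size > 2:
--                     final_obj.append((a_start + i, b_start + j, size, matched))
--                 a, b = a[i + size:], b[j + size:]
--                 a_start, b_start = a_start + i + size, b_start + j + size
--                 restarted = True
--                 break
--             if size > 2: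
--                 final_obj.append((a_start + i, b_start + j, size, matched))
--         if not restarted:
--             return final_obj
-- ===== Notes on version B (the rewrite author's own statement) =====
-- stated objective: alternative
-- what changed: B re-implements the sequence matcher inline (no difflib import), replaces A's tail recursion by a single accumulator loop over the shrinking suffix pair, collapses the character-by-character backslash stripping into one rstrip, and tests region overlap by interval arithmetic instead of materialised set(range(...)) intersections (measured ~1.4-1.5x, below a timing run's consistent-faster bar).
import Mathlib
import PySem

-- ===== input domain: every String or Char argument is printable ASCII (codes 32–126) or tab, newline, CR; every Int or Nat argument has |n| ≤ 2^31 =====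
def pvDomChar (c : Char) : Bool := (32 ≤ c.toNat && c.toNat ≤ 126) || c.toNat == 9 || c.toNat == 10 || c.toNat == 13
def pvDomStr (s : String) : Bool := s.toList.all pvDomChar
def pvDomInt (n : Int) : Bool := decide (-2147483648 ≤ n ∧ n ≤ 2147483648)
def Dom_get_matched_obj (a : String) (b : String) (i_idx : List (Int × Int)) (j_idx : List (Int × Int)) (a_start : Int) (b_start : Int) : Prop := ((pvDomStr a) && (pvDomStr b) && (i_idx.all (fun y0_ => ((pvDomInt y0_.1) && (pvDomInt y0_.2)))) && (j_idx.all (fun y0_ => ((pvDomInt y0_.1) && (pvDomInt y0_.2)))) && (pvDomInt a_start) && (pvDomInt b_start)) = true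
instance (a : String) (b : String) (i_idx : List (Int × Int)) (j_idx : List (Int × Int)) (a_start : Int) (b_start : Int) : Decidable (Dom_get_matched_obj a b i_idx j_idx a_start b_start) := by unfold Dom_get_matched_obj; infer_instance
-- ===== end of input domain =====

-- B replaces A's tail recursion by an accumulator loop, A's character-by-character
-- backslash stripping by one rstrip, and A's set-materialising in_regex by interval
-- arithmetic per region pair.

-- ===== SHARED MATCHER HELPERS: A calls difflib.SequenceMatcher(None,a,b).get_matching_blocks()
-- and B re-implements that exact algorithm inline (Source B's _matching_blocks), so one hand
-- port (CPython difflib, isjunk=None) transliterates both =====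

-- __chain_b: b2j[elt] = list of indices of elt in b (ascending), then autojunk purge of
-- "popular" elements when len(b) >= 200.  setdefault+append is Dict.modify with append.
def pvChainB (bl : List Char) : PySem.Dict Char (List Nat) :=
  let d := (PySem.List.enumerate bl).foldl
    (fun d p => d.modify (p.2) [] (fun l => l ++ [p.1.toNat])) PySem.Dict.empty
  let n := bl.length
  if 200 ≤ n then
    let ntest := n / 100 + 1
    -- del of the popular keys keeps the remaining items in order: a filter
    PySem.Dict.mk (d.items.filter (fun kv => decide (kv.2.length ≤ ntest)))
  else d

-- inner 'for j in b2j.get(a[i], nothing)' loop of find_longest_match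
-- (j2len has Int keys so that the lookup of j-1 at j = 0 misses, as Python's -1 does)
def pvFlmJs (blo bhi i : Nat) (j2len : PySem.Dict Int Nat) :
    List Nat → PySem.Dict Int Nat → (Nat × Nat × Nat) → (PySem.Dict Int Nat × (Nat × Nat × Nat))
  | [], newd, best => (newd, best)
  | j :: js, newd, best =>
    if j < blo then pvFlmJs blo bhi i j2len js newd best
    else if bhi ≤ j then (newd, best)                      -- break
    else
      let k := j2len.getD ((j : Int) - 1) 0 + 1
      let newd := newd.insert (j : Int) k
      let best := if best.2.2 < k then (i + 1 - k, j + 1 - k, k) else best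
      pvFlmJs blo bhi i j2len js newd best

-- outer 'for i in range(alo, ahi)' loop
def pvFlmRows (al : List Char) (b2j : PySem.Dict Char (List Nat)) (blo bhi : Nat) :
    List Nat → PySem.Dict Int Nat → (Nat × Nat × Nat) → (Nat × Nat × Nat)
  | [], _, best => best
  | i :: is, j2len, best =>
    let js := b2j.getD (al.getD i ' ') []
    let r := pvFlmJs blo bhi i j2len js PySem.Dict.empty best
    pvFlmRows al b2j blo bhi is r.1 r.2

-- 'while besti > alo and bestj > blo and a[besti-1] == b[bestj-1]' (fuel = besti: the loop
-- decrements besti each pass, so besti passes suffice)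
def pvExtL (al bl : List Char) (alo blo : Nat) : Nat → Nat → Nat → Nat → (Nat × Nat × Nat)
  | 0, bi, bj, bs => (bi, bj, bs)
  | fuel + 1, bi, bj, bs =>
    if alo < bi ∧ blo < bj ∧ al.getD (bi - 1) ' ' = bl.getD (bj - 1) ' '
    then pvExtL al bl alo blo fuel (bi - 1) (bj - 1) (bs + 1)
    else (bi, bj, bs)

-- 'while besti+bestsize < ahi and bestj+bestsize < bhi and a[..] == b[..]' (fuel = ahi-(bi+bs))
def pvExtR (al bl : List Char) (ahi bhi : Nat) : Nat → Nat → Nat → Nat → Nat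
  | 0, _, _, bs => bs
  | fuel + 1, bi, bj, bs =>
    if bi + bs < ahi ∧ bj + bs < bhi ∧ al.getD (bi + bs) ' ' = bl.getD (bj + bs) ' '
    then pvExtR al bl ahi bhi fuel bi bj (bs + 1)
    else bs

-- find_longest_match(alo, ahi, blo, bhi); with isjunk=None bjunk is empty, so the two
-- junk-extension while loops of CPython never fire and are omitted.
def pvFlm (al bl : List Char) (b2j : PySem.Dict Char (List Nat)) (alo ahi blo bhi : Nat) :
    Nat × Nat × Nat :=
  let best := pvFlmRows al b2j blo bhi (List.range' alo (ahi - alo)) PySem.Dict.empty (alo, blo, 0)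
  let e := pvExtL al bl alo blo best.1 best.1 best.2.1 best.2.2
  (e.1, e.2.1, pvExtR al bl ahi bhi (ahi - (e.1 + e.2.2)) e.1 e.2.1 e.2.2)

-- 'while queue' loop of get_matching_blocks; the Python list-as-stack (append/pop at the
-- end) is represented with its top at the head, so pop = head and append = cons.
-- fuel: each pass removes ≥ 1 from Σ over the queue of (ahi-alo)+(bhi-blo)+1.
def pvGmbLoop (al bl : List Char) (b2j : PySem.Dict Char (List Nat)) :
    Nat → List (Nat × Nat × Nat × Nat) → List (Nat × Nat × Nat) → List (Nat × Nat × Nat)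
  | 0, _, acc => acc
  | _ + 1, [], acc => acc
  | fuel + 1, (alo, ahi, blo, bhi) :: rest, acc =>
    let x := pvFlm al bl b2j alo ahi blo bhi
    let i := x.1; let j := x.2.1; let k := x.2.2
    if k ≠ 0 then
      let q1 := if alo < i ∧ blo < j then (alo, i, blo, j) :: rest else rest
      let q2 := if i + k < ahi ∧ j + k < bhi then (i + k, ahi, j + k, bhi) :: q1 else q1
      pvGmbLoop al bl b2j fuel q2 (acc ++ [x])
    else pvGmbLoop al bl b2j fuel rest acc

-- the collapse-adjacent-blocks loop (cur is the running (i1,j1,k1))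
def pvMerge : List (Nat × Nat × Nat) → (Nat × Nat × Nat) → List (Nat × Nat × Nat) → List (Nat × Nat × Nat)
  | [], cur, acc => if cur.2.2 ≠ 0 then acc ++ [cur] else acc
  | (i2, j2, k2) :: rest, cur, acc =>
    if cur.1 + cur.2.2 = i2 ∧ cur.2.1 + cur.2.2 = j2 then
      pvMerge rest (cur.1, cur.2.1, cur.2.2 + k2) acc
    else pvMerge rest (i2, j2, k2) (if cur.2.2 ≠ 0 then acc ++ [cur] else acc)

-- get_matching_blocks().  Python sorts the (i,j,k) triples lexicographically; the blocks
-- found have pairwise disjoint a-ranges (distinct i), so the stable sort on (i, j) below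
-- computes the same list.
def pvGmb (al bl : List Char) : List (Nat × Nat × Nat) :=
  let b2j := pvChainB bl
  let raw := pvGmbLoop al bl b2j (al.length + bl.length + 2) [(0, al.length, 0, bl.length)] []
  let sorted := PySem.List.sorted2 raw (fun t => t.1) (fun t => t.2.1)
  pvMerge sorted (0, 0, 0) [] ++ [(al.length, bl.length, 0)]

-- ===== PORT A =====

-- in_regex: per region a set intersection of materialised ranges.
-- set(range(a, b)) is ported as the range's element list itself: a range has no
-- duplicates, so that list IS the PySem.Set (Set.ofList would be the identity on it).
def pv_in_regex_go (cur : PySem.Set Int) : List (Int × Int) → Bool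
  | [] => false
  | (beg, en) :: rest =>
    let tmp : PySem.Set Int := PySem.List.pyRange beg en
    let same := PySem.Set.inter tmp cur
    if !same.isEmpty && !(PySem.Set.equal same tmp) then true else pv_in_regex_go cur rest

def pv_in_regex (idx : Int) (size : Nat) (var_idx : List (Int × Int)) : Bool :=
  pv_in_regex_go (PySem.List.pyRange idx (idx + size)) var_idx

-- the 'while size > 0 and matched[-1] == "\\"' stripping loop (recursion on the counter)
def pvStripGo : List Char → Nat → (List Char × Nat)
  | m, 0 => (m, 0)
  | m, s + 1 => if m.getLast? = some '\\' then pvStripGo m.dropLast s else (m, s + 1)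

-- A's body: the 'for i, j, size in match_obj' loop; the recursive call re-diffs the suffixes.
-- fuel only limits A's own recursion depth (each recursive call drops ≥ 1 char of a on
-- terminating runs, see Pre_); blocks are Nat triples, a[i:i+size] = (drop i).take size (i ≥ 0).
def pvGmoA : Nat → List (Nat × Nat × Nat) → List Char → List Char →
    List (Int × Int) → List (Int × Int) → Int → Int → List (Int × Int × Int × String)
  | _, [], _, _, _, _, _, _ => []
  | fuel, (i, j, size) :: rest, al, bl, ii, jj, as_, bs_ =>
    let matched := (al.drop i).take size
    if size = 0 then [(as_ + i, bs_ + j, (size : Int), String.ofList matched)]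
    else if pv_in_regex (as_ + i) size ii || pv_in_regex (bs_ + j) size jj then
      pvGmoA fuel rest al bl ii jj as_ bs_
    else if matched = ['\\'] then pvGmoA fuel rest al bl ii jj as_ bs_
    else if matched.getLast? = some '\\' ∧ ¬(i + size = al.length ∨ j + size = bl.length) then
      let p := pvStripGo matched.dropLast (size - 1)
      (if 2 < p.2 then [(as_ + i, bs_ + j, (p.2 : Int), String.ofList p.1)] else []) ++
      (match fuel with
       | 0 => []
       | f + 1 =>
         pvGmoA f (pvGmb (al.drop (i + p.2)) (bl.drop (j + p.2)))
           (al.drop (i + p.2)) (bl.drop (j + p.2)) ii jj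
           ((i : Int) + p.2 + as_) ((j : Int) + p.2 + bs_))
    else if 2 < size then
      (as_ + i, bs_ + j, (size : Int), String.ofList matched) :: pvGmoA fuel rest al bl ii jj as_ bs_
    else pvGmoA fuel rest al bl ii jj as_ bs_
termination_by fuel blocks => (fuel, blocks)

def get_matched_obj (a : String) (b : String) (i_idx : List (Int × Int)) (j_idx : List (Int × Int)) (a_start : Int) (b_start : Int) : List (Int × Int × Int × String) :=
  pvGmoA (a.toList.length + 1) (pvGmb a.toList b.toList) a.toList b.toList i_idx j_idx a_start b_start

-- ===== PORT B =====

-- B's _cut_by_region: pure interval arithmetic, early return = any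
def pv_cut_by_region (idx : Int) (size : Nat) (var_idx : List (Int × Int)) : Bool :=
  var_idx.any (fun p =>
    decide (max p.1 idx < min p.2 (idx + size) ∧ ¬(idx ≤ p.1 ∧ p.2 ≤ idx + size)))

-- matched.rstrip("\\"): drop the maximal trailing run of backslashes (exact)
def pvRstripBS (m : List Char) : List Char := (m.reverse.dropWhile (· == '\\')).reverse

-- B's single while-True loop; final_obj is the accumulator acc, the 'continue' of the
-- outer loop is the fuel-indexed recursive call on the updated state.
def pvGmoB : Nat → List (Nat × Nat × Nat) → List Char → List Char →
    List (Int × Int) → List (Int × Int) → Int → Int →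
    List (Int × Int × Int × String) → List (Int × Int × Int × String)
  | _, [], _, _, _, _, _, _, acc => acc
  | fuel, (i, j, size) :: rest, al, bl, ii, jj, as_, bs_, acc =>
    if size = 0 then acc ++ [(as_ + i, bs_ + j, 0, "")]
    else if pv_cut_by_region (as_ + i) size ii || pv_cut_by_region (bs_ + j) size jj then
      pvGmoB fuel rest al bl ii jj as_ bs_ acc
    else
      let matched := (al.drop i).take size
      if matched = ['\\'] then pvGmoB fuel rest al bl ii jj as_ bs_ acc
      else if matched.getLast? = some '\\' ∧ ¬(i + size = al.length ∨ j + size = bl.length) then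
        let m2 := pvRstripBS matched
        let s2 := m2.length
        let acc' := if 2 < s2 then acc ++ [(as_ + i, bs_ + j, (s2 : Int), String.ofList m2)] else acc
        match fuel with
        | 0 => acc'
        | f + 1 =>
          pvGmoB f (pvGmb (al.drop (i + s2)) (bl.drop (j + s2)))
            (al.drop (i + s2)) (bl.drop (j + s2)) ii jj
            (as_ + i + s2) (bs_ + j + s2) acc'
      else if 2 < size then
        pvGmoB fuel rest al bl ii jj as_ bs_ (acc ++ [(as_ + i, bs_ + j, (size : Int), String.ofList matched)])
      else pvGmoB fuel rest al bl ii jj as_ bs_ acc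
termination_by fuel blocks => (fuel, blocks)

def get_matched_obj_alt (a : String) (b : String) (i_idx : List (Int × Int)) (j_idx : List (Int × Int)) (a_start : Int) (b_start : Int) : List (Int × Int × Int × String) :=
  pvGmoB (a.toList.length + 1) (pvGmb a.toList b.toList) a.toList b.toList i_idx j_idx a_start b_start []

-- ===== PRECONDITION & SPEC =====
-- (no Pre_: the ports are total and equal on every input; on inputs where both strings
-- contain a run of two backslashes the PYTHONS may recurse/loop forever — both A and B —
-- and the fuel-indexed ports below agree there too)
def Spec_get_matched_obj (a : String) (b : String) (i_idx : List (Int × Int)) (j_idx : List (Int × Int)) (a_start : Int) (b_start : Int) (out : List (Int × Int × Int × String)) : Prop := out = get_matched_obj_alt a b i_idx j_idx a_start b_start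
instance (a : String) (b : String) (i_idx : List (Int × Int)) (j_idx : List (Int × Int)) (a_start : Int) (b_start : Int) (out : List (Int × Int × Int × String)) : Decidable (Spec_get_matched_obj a b i_idx j_idx a_start b_start out) := by unfold Spec_get_matched_obj; infer_instance

-- ===== CLAIM (what is proved, stated in full; the proofs are below) =====
def Claim_equal_get_matched_obj : Prop := ∀ (a : String) (b : String) (i_idx : List (Int × Int)) (j_idx : List (Int × Int)) (a_start : Int) (b_start : Int), Dom_get_matched_obj a b i_idx j_idx a_start b_start → Spec_get_matched_obj a b i_idx j_idx a_start b_start (get_matched_obj a b i_idx j_idx a_start b_start)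

-- ===== LEMMAS AND PROOFS =====

-- (1) in_regex ↔ interval arithmetic.  Per region, 'the range sets intersect but the
-- intersection is not all of tmp_set' is exactly 'the intervals overlap and [beg,end) is
-- not contained in [idx, idx+size)'.
theorem in_regex_cond_eq (idx : Int) (size : Nat) (beg en : Int) :
    (let tmp : PySem.Set Int := PySem.List.pyRange beg en
     let same := PySem.Set.inter tmp (PySem.List.pyRange idx (idx + size))
     (!same.isEmpty && !(PySem.Set.equal same tmp)))
    = decide (max beg idx < min en (idx + size) ∧ ¬(idx ≤ beg ∧ en ≤ idx + size)) := by
  have hmem : ∀ x : Int,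
      (x ∈ PySem.Set.inter (PySem.List.pyRange beg en : PySem.Set Int)
        (PySem.List.pyRange idx (idx + size))) ↔
      ((beg ≤ x ∧ x < en) ∧ (idx ≤ x ∧ x < idx + size)) := by
    intro x
    simp [PySem.Set.inter, List.mem_filter, PySem.Set.contains,
      PySem.List.mem_pyRange_one]
  rw [Bool.eq_iff_iff]
  simp only [Bool.and_eq_true, Bool.not_eq_true', decide_eq_true_eq]
  constructor
  · rintro ⟨hne, heq⟩
    rw [List.isEmpty_eq_false_iff_exists_mem] at hne
    obtain ⟨x, hx⟩ := hne
    rw [hmem] at hx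
    refine ⟨by rw [max_lt_iff, lt_min_iff, lt_min_iff]; omega, fun hc => ?_⟩
    apply absurd heq; simp only [Bool.not_eq_false]
    unfold PySem.Set.equal PySem.Set.issubset
    rw [Bool.and_eq_true, List.all_eq_true, List.all_eq_true]
    constructor
    · intro y hy
      simp only [PySem.Set.contains, List.contains_iff_mem]
      have := (hmem y).mp hy
      simp [PySem.List.mem_pyRange_one]; omega
    · intro y hy
      simp only [PySem.List.mem_pyRange_one] at hy
      simp only [PySem.Set.contains, List.contains_iff_mem, hmem]; omega
  · rintro ⟨h1, h2⟩
    rw [max_lt_iff, lt_min_iff, lt_min_iff] at h1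
    constructor
    · rw [List.isEmpty_eq_false_iff_exists_mem]
      refine ⟨max beg idx, (hmem _).mpr ?_⟩
      simp only [le_max_iff, max_lt_iff]
      omega
    · unfold PySem.Set.equal PySem.Set.issubset
      rw [Bool.and_eq_false_iff]
      right
      rw [List.all_eq_false]
      by_cases hb : idx ≤ beg
      · refine ⟨en - 1, ?_, ?_⟩
        · simp [PySem.List.mem_pyRange_one]; omega
        · simp only [PySem.Set.contains, List.contains_iff_mem, hmem]; omega
      · refine ⟨beg, ?_, ?_⟩
        · simp [PySem.List.mem_pyRange_one]; omega
        · simp only [PySem.Set.contains, List.contains_iff_mem, hmem]; omega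

theorem in_regex_eq (idx : Int) (size : Nat) (var_idx : List (Int × Int)) :
    pv_in_regex idx size var_idx = pv_cut_by_region idx size var_idx := by
  unfold pv_in_regex pv_cut_by_region
  induction var_idx with
  | nil => rfl
  | cons p rest ih =>
    obtain ⟨beg, en⟩ := p
    rw [List.any_cons]
    show (if _ then _ else _) = _
    rw [in_regex_cond_eq idx size beg en]
    by_cases hc : (max beg idx < min en (idx + size) ∧ ¬(idx ≤ beg ∧ en ≤ idx + size))
    · simp [hc]
    · rw [decide_eq_false hc, if_neg Bool.false_ne_true, Bool.false_or]
      exact ih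

-- (2) the stripping loop is rstrip
theorem rstrip_dropLast (m : List Char) (h : m.getLast? = some '\\') :
    pvRstripBS m = pvRstripBS m.dropLast := by
  rw [List.getLast?_eq_head?_reverse] at h
  have hrev : m.reverse = '\\' :: m.reverse.tail := (List.cons_head?_tail h).symm
  unfold pvRstripBS
  rw [← List.tail_reverse]
  conv_lhs => rw [hrev]
  rw [List.dropWhile_cons_of_pos (by simp)]

theorem rstrip_of_ne (m : List Char) (h : ¬ m.getLast? = some '\\') :
    pvRstripBS m = m := by
  unfold pvRstripBS
  rw [List.getLast?_eq_head?_reverse] at h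
  match hm : m.reverse with
  | [] =>
    have : m = [] := by simpa using congrArg List.reverse hm
    simp [this]
  | c :: t =>
    rw [hm] at h
    rw [List.dropWhile_cons_of_neg (by simpa using fun hc => h (by rw [hc]; rfl))]
    rw [← hm, List.reverse_reverse]

theorem strip_eq (s : Nat) (m : List Char) (h : m.length = s) :
    pvStripGo m s = (pvRstripBS m, (pvRstripBS m).length) := by
  induction s generalizing m with
  | zero =>
    have : m = [] := List.length_eq_zero_iff.mp h
    subst this; rfl
  | succ n ih =>
    unfold pvStripGo
    by_cases hl : m.getLast? = some '\\'
    · rw [if_pos hl, ih m.dropLast (by rw [List.length_dropLast, h]; rfl),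
        rstrip_dropLast m hl]
    · rw [if_neg hl, rstrip_of_ne m hl, h]

-- (3) every block of pvGmb lies inside the two strings.
-- Invariants: pvDictInv bounds the j2len chain lengths, pvPost bounds the running best.
def pvDictInv (alo blo bhi iB : Nat) (d : PySem.Dict Int Nat) : Prop :=
  ∀ p ∈ d.items, ∃ jn : Nat, p.1 = (jn : Int) ∧ blo ≤ jn ∧ jn < bhi ∧
    p.2 + blo ≤ jn + 1 ∧ p.2 + alo ≤ iB

def pvPost (alo ahi blo bhi : Nat) (t : Nat × Nat × Nat) : Prop :=
  alo ≤ t.1 ∧ t.1 + t.2.2 ≤ ahi ∧ blo ≤ t.2.1 ∧ t.2.1 + t.2.2 ≤ bhi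

theorem dict_get?_mem {d : PySem.Dict Int Nat} {k : Int} {v : Nat} (h : d.get? k = some v) :
    (k, v) ∈ d.items := by
  unfold PySem.Dict.get? at h
  cases hf : List.find? (fun p => p.1 == k) d.items with
  | none => rw [hf] at h; simp at h
  | some p0 =>
    rw [hf] at h
    simp only [Option.map_some, Option.some.injEq] at h
    have hm := List.mem_of_find?_eq_some hf
    have hk := List.find?_some hf
    simp only [beq_iff_eq] at hk
    have : p0 = (k, v) := by cases p0; simp_all
    rwa [this] at hm

theorem dict_mem_insert {d : PySem.Dict Int Nat} {k : Int} {v : Nat} {p : Int × Nat}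
    (h : p ∈ (d.insert k v).items) : p = (k, v) ∨ p ∈ d.items := by
  unfold PySem.Dict.insert at h
  by_cases hc : d.contains k = true
  · rw [if_pos hc] at h
    simp only [List.mem_map] at h
    obtain ⟨q, hq, hpq⟩ := h
    by_cases hqk : (q.1 == k) = true
    · rw [if_pos hqk] at hpq; exact Or.inl hpq.symm
    · rw [if_neg hqk] at hpq; exact Or.inr (hpq ▸ hq)
  · rw [if_neg hc] at h
    rcases List.mem_append.mp h with h' | h'
    · exact Or.inr h'
    · exact Or.inl (by simpa using h')

theorem flmJs_inv (alo ahi blo bhi i : Nat) (j2len : PySem.Dict Int Nat)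
    (hA : alo ≤ i) (hI : i < ahi) (hd : pvDictInv alo blo bhi i j2len) :
    ∀ js newd best, pvDictInv alo blo bhi (i + 1) newd → pvPost alo ahi blo bhi best →
    pvDictInv alo blo bhi (i + 1) (pvFlmJs blo bhi i j2len js newd best).1 ∧
    pvPost alo ahi blo bhi (pvFlmJs blo bhi i j2len js newd best).2 := by
  intro js
  induction js with
  | nil => intro newd best hn hb; exact ⟨hn, hb⟩
  | cons j js ih =>
    intro newd best hn hb
    unfold pvFlmJs
    by_cases h1 : j < blo
    · rw [if_pos h1]; exact ih newd best hn hb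
    rw [if_neg h1]
    by_cases h2 : bhi ≤ j
    · rw [if_pos h2]; exact ⟨hn, hb⟩
    rw [if_neg h2]
    push_neg at h1 h2
    -- bound the new chain length k
    have hk : (j2len.getD ((j : Int) - 1) 0 + 1) + blo ≤ j + 1 ∧
        (j2len.getD ((j : Int) - 1) 0 + 1) + alo ≤ i + 1 := by
      unfold PySem.Dict.getD
      cases hg : j2len.get? ((j : Int) - 1) with
      | none => simp only [Option.getD_none]; omega
      | some v =>
        simp only [Option.getD_some]
        obtain ⟨jn, hjn, hb1, hb2, hb3, hb4⟩ := hd _ (dict_get?_mem hg)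
        simp only at hjn
        have h' : (j : Int) - 1 = (jn : Int) := hjn
        omega
    refine ih _ _ ?_ ?_
    · -- the inserted entry respects the invariant
      intro p hp
      rcases dict_mem_insert hp with hpe | hpo
      · exact ⟨j, by rw [hpe], h1, h2, by rw [hpe]; omega, by rw [hpe]; omega⟩
      · exact hn p hpo
    · -- the updated best respects pvPost
      by_cases hbk : best.2.2 < j2len.getD ((j : Int) - 1) 0 + 1
      · rw [if_pos hbk]
        unfold pvPost at hb ⊢
        dsimp only at hb ⊢
        omega
      · rw [if_neg hbk]; exact hb

theorem flmRows_inv (al : List Char) (b2j : PySem.Dict Char (List Nat))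
    (alo ahi blo bhi : Nat) :
    ∀ (n a0 : Nat) (d : PySem.Dict Int Nat) (best : Nat × Nat × Nat), alo ≤ a0 →
    a0 + n ≤ ahi → pvDictInv alo blo bhi a0 d → pvPost alo ahi blo bhi best →
    pvPost alo ahi blo bhi (pvFlmRows al b2j blo bhi (List.range' a0 n) d best) := by
  intro n
  induction n with
  | zero => intro a0 d best _ _ _ hb; exact hb
  | succ m ih =>
    intro a0 d best h1 h2 hd hb
    rw [List.range'_succ]
    unfold pvFlmRows
    have hres := flmJs_inv alo ahi blo bhi a0 d h1 (by omega) hd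
      (b2j.getD (al.getD a0 ' ') []) PySem.Dict.empty best (by intro p hp; simp [PySem.Dict.empty] at hp) hb
    exact ih (a0 + 1) _ _ (by omega) (by omega) hres.1 hres.2

theorem extL_inv (al bl : List Char) (alo ahi blo bhi : Nat) :
    ∀ (fuel bi bj bs : Nat), pvPost alo ahi blo bhi (bi, bj, bs) →
    pvPost alo ahi blo bhi (pvExtL al bl alo blo fuel bi bj bs) := by
  intro fuel
  induction fuel with
  | zero => intro bi bj bs hb; exact hb
  | succ m ih =>
    intro bi bj bs hb
    unfold pvExtL
    split
    · next hcond =>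
      obtain ⟨c1, c2, _⟩ := hcond
      refine ih _ _ _ ?_
      unfold pvPost at hb ⊢
      dsimp only at hb ⊢
      omega
    · exact hb

theorem extR_inv (al bl : List Char) (alo ahi blo bhi : Nat) :
    ∀ (fuel bi bj bs : Nat), pvPost alo ahi blo bhi (bi, bj, bs) →
    pvPost alo ahi blo bhi (bi, bj, pvExtR al bl ahi bhi fuel bi bj bs) := by
  intro fuel
  induction fuel with
  | zero => intro bi bj bs hb; exact hb
  | succ m ih =>
    intro bi bj bs hb
    unfold pvExtR
    split
    · next hcond =>
      obtain ⟨c1, c2, _⟩ := hcond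
      refine ih _ _ _ ?_
      unfold pvPost at hb ⊢
      dsimp only at hb ⊢
      omega
    · exact hb

theorem flm_post (al bl : List Char) (b2j : PySem.Dict Char (List Nat))
    (alo ahi blo bhi : Nat) (h1 : alo ≤ ahi) (h2 : blo ≤ bhi) :
    pvPost alo ahi blo bhi (pvFlm al bl b2j alo ahi blo bhi) := by
  unfold pvFlm
  have hrows := flmRows_inv al b2j alo ahi blo bhi (ahi - alo) alo PySem.Dict.empty
    (alo, blo, 0) (le_refl _) (by omega) (by intro p hp; simp [PySem.Dict.empty] at hp)
    ⟨le_refl _, by omega, le_refl _, by omega⟩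
  set best := pvFlmRows al b2j blo bhi (List.range' alo (ahi - alo)) PySem.Dict.empty (alo, blo, 0)
  have hext := extL_inv al bl alo ahi blo bhi best.1 best.1 best.2.1 best.2.2 hrows
  set e := pvExtL al bl alo blo best.1 best.1 best.2.1 best.2.2
  have := extR_inv al bl alo ahi blo bhi (ahi - (e.1 + e.2.2)) e.1 e.2.1 e.2.2 hext
  exact this

theorem gmbLoop_bounds (al bl : List Char) (b2j : PySem.Dict Char (List Nat)) :
    ∀ (fuel : Nat) (queue : List (Nat × Nat × Nat × Nat)) (acc : List (Nat × Nat × Nat)),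
    (∀ q ∈ queue, q.1 ≤ q.2.1 ∧ q.2.1 ≤ al.length ∧ q.2.2.1 ≤ q.2.2.2 ∧ q.2.2.2 ≤ bl.length) →
    (∀ t ∈ acc, t.1 + t.2.2 ≤ al.length ∧ t.2.1 + t.2.2 ≤ bl.length) →
    ∀ t ∈ pvGmbLoop al bl b2j fuel queue acc,
      t.1 + t.2.2 ≤ al.length ∧ t.2.1 + t.2.2 ≤ bl.length := by
  intro fuel
  induction fuel with
  | zero => intro queue acc _ ha; exact ha
  | succ m ih =>
    intro queue acc hq ha
    match queue with
    | [] => exact ha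
    | (alo, ahi, blo, bhi) :: rest =>
      have hr := hq _ List.mem_cons_self
      dsimp only at hr
      obtain ⟨r1, r2, r3, r4⟩ := hr
      have hp := flm_post al bl b2j alo ahi blo bhi r1 r3
      obtain ⟨p1, p2, p3, p4⟩ := hp
      have hrest : ∀ q ∈ rest, q.1 ≤ q.2.1 ∧ q.2.1 ≤ al.length ∧ q.2.2.1 ≤ q.2.2.2 ∧ q.2.2.2 ≤ bl.length :=
        fun q hq' => hq _ (List.mem_cons_of_mem _ hq')
      intro t ht
      unfold pvGmbLoop at ht
      dsimp only at ht
      by_cases hk : (pvFlm al bl b2j alo ahi blo bhi).2.2 ≠ 0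
      · rw [if_pos hk] at ht
        have hq1 : ∀ q ∈ (if alo < (pvFlm al bl b2j alo ahi blo bhi).1 ∧ blo < (pvFlm al bl b2j alo ahi blo bhi).2.1
              then (alo, (pvFlm al bl b2j alo ahi blo bhi).1, blo, (pvFlm al bl b2j alo ahi blo bhi).2.1) :: rest else rest),
            q.1 ≤ q.2.1 ∧ q.2.1 ≤ al.length ∧ q.2.2.1 ≤ q.2.2.2 ∧ q.2.2.2 ≤ bl.length := by
          split
          · intro q hq'
            rcases List.mem_cons.mp hq' with he | h3
            · subst he; dsimp only; omega
            · exact hrest _ h3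
          · exact hrest
        have hq2 : ∀ q ∈ (if (pvFlm al bl b2j alo ahi blo bhi).1 + (pvFlm al bl b2j alo ahi blo bhi).2.2 < ahi ∧
                (pvFlm al bl b2j alo ahi blo bhi).2.1 + (pvFlm al bl b2j alo ahi blo bhi).2.2 < bhi
              then ((pvFlm al bl b2j alo ahi blo bhi).1 + (pvFlm al bl b2j alo ahi blo bhi).2.2, ahi,
                    (pvFlm al bl b2j alo ahi blo bhi).2.1 + (pvFlm al bl b2j alo ahi blo bhi).2.2, bhi) ::
                   (if alo < (pvFlm al bl b2j alo ahi blo bhi).1 ∧ blo < (pvFlm al bl b2j alo ahi blo bhi).2.1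
                    then (alo, (pvFlm al bl b2j alo ahi blo bhi).1, blo, (pvFlm al bl b2j alo ahi blo bhi).2.1) :: rest else rest)
              else (if alo < (pvFlm al bl b2j alo ahi blo bhi).1 ∧ blo < (pvFlm al bl b2j alo ahi blo bhi).2.1
                    then (alo, (pvFlm al bl b2j alo ahi blo bhi).1, blo, (pvFlm al bl b2j alo ahi blo bhi).2.1) :: rest else rest)),
            q.1 ≤ q.2.1 ∧ q.2.1 ≤ al.length ∧ q.2.2.1 ≤ q.2.2.2 ∧ q.2.2.2 ≤ bl.length := by
          split
          · intro q hq'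
            rcases List.mem_cons.mp hq' with he | h3
            · subst he; dsimp only; omega
            · exact hq1 _ h3
          · exact hq1
        refine ih _ _ hq2 ?_ t ht
        intro u hu
        rcases List.mem_append.mp hu with h' | h'
        · exact ha u h'
        · have : u = pvFlm al bl b2j alo ahi blo bhi := by simpa using h'
          rw [this]
          exact ⟨by omega, by omega⟩
      · rw [if_neg hk] at ht
        exact ih rest acc hrest ha t ht

theorem merge_bounds (la lb : Nat) :
    ∀ (l : List (Nat × Nat × Nat)) (cur : Nat × Nat × Nat) (acc : List (Nat × Nat × Nat)),
    (∀ t ∈ l, t.1 + t.2.2 ≤ la ∧ t.2.1 + t.2.2 ≤ lb) →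
    (cur.1 + cur.2.2 ≤ la ∧ cur.2.1 + cur.2.2 ≤ lb) →
    (∀ t ∈ acc, t.1 + t.2.2 ≤ la ∧ t.2.1 + t.2.2 ≤ lb) →
    ∀ t ∈ pvMerge l cur acc, t.1 + t.2.2 ≤ la ∧ t.2.1 + t.2.2 ≤ lb := by
  intro l
  induction l with
  | nil =>
    intro cur acc _ hc ha
    unfold pvMerge
    split
    · intro t ht
      rcases List.mem_append.mp ht with h' | h'
      · exact ha t h'
      · simpa [List.mem_singleton.mp h'] using hc
    · exact ha
  | cons hd tl ih =>
    intro cur acc hl hc ha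
    obtain ⟨i2, j2, k2⟩ := hd
    have hh := hl _ List.mem_cons_self
    unfold pvMerge
    split
    · next hcond =>
      exact ih _ _ (fun t ht => hl t (List.mem_cons_of_mem _ ht))
        (by simp only at hh ⊢; omega) ha
    · apply ih _ _ (fun t ht => hl t (List.mem_cons_of_mem _ ht)) (by simpa using hh)
      intro t ht
      split at ht
      · rcases List.mem_append.mp ht with h' | h'
        · exact ha t h'
        · simpa [List.mem_singleton.mp h'] using hc
      · exact ha t ht

theorem gmb_bounds (al bl : List Char) :
    ∀ t ∈ pvGmb al bl, t.1 + t.2.2 ≤ al.length ∧ t.2.1 + t.2.2 ≤ bl.length := by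
  intro t ht
  unfold pvGmb at ht
  rcases List.mem_append.mp ht with h' | h'
  · refine merge_bounds al.length bl.length _ _ _ ?_ (by simp) (by simp) t h'
    intro u hu
    have hu' := (PySem.List.sorted2_perm _ _ _ _).mem_iff.mp hu
    exact gmbLoop_bounds al bl (pvChainB bl) _ _ _
      (by intro q hq; simp only [List.mem_singleton.mp hq]; exact ⟨by omega, by omega, by omega, by omega⟩)
      (by intro u hu; simp at hu) u hu'
  · simp only [List.mem_singleton.mp h']
    exact ⟨by omega, by omega⟩

-- (4) the accumulator loop of B computes A's recursion
theorem loop_eq : ∀ (fuel : Nat) (blocks : List (Nat × Nat × Nat)) (al bl : List Char)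
    (ii jj : List (Int × Int)) (as_ bs_ : Int) (acc : List (Int × Int × Int × String)),
    (∀ t ∈ blocks, t.1 + t.2.2 ≤ al.length ∧ t.2.1 + t.2.2 ≤ bl.length) →
    pvGmoB fuel blocks al bl ii jj as_ bs_ acc = acc ++ pvGmoA fuel blocks al bl ii jj as_ bs_ := by
  intro fuel
  induction fuel using Nat.strong_induction_on with
  | _ fuel ihf =>
  intro blocks
  induction blocks with
  | nil => intro al bl ii jj as_ bs_ acc _; simp [pvGmoA, pvGmoB]
  | cons blk rest ihb =>
    intro al bl ii jj as_ bs_ acc hB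
    obtain ⟨i, j, size⟩ := blk
    have hBr : ∀ t ∈ rest, t.1 + t.2.2 ≤ al.length ∧ t.2.1 + t.2.2 ≤ bl.length :=
      fun t ht => hB t (List.mem_cons_of_mem _ ht)
    have hBh := hB _ List.mem_cons_self
    dsimp only at hBh
    rw [pvGmoA.eq_def, pvGmoB.eq_def]
    dsimp only
    rw [in_regex_eq (as_ + i) size ii, in_regex_eq (bs_ + j) size jj]
    by_cases c0 : size = 0
    · rw [if_pos c0, if_pos c0]
      subst c0
      simp
    rw [if_neg c0, if_neg c0]
    by_cases c1 : (pv_cut_by_region (as_ + i) size ii || pv_cut_by_region (bs_ + j) size jj) = true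
    · rw [if_pos c1, if_pos c1]
      exact ihb al bl ii jj as_ bs_ acc hBr
    rw [if_neg c1, if_neg c1]
    by_cases c2 : (al.drop i).take size = ['\\']
    · rw [if_pos c2, if_pos c2]
      exact ihb al bl ii jj as_ bs_ acc hBr
    rw [if_neg c2, if_neg c2]
    by_cases c3 : ((al.drop i).take size).getLast? = some '\\' ∧
        ¬(i + size = al.length ∨ j + size = bl.length)
    · rw [if_pos c3, if_pos c3]
      have hlen : ((al.drop i).take size).length = size := by
        rw [List.length_take, List.length_drop]
        omega
      have hp : pvStripGo ((al.drop i).take size).dropLast (size - 1) =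
          (pvRstripBS ((al.drop i).take size), (pvRstripBS ((al.drop i).take size)).length) := by
        rw [strip_eq (size - 1) _ (by rw [List.length_dropLast, hlen]),
          ← rstrip_dropLast _ c3.1]
      rw [hp]
      dsimp only
      have e1 : (i : Int) + (pvRstripBS ((al.drop i).take size)).length + as_
          = as_ + i + (pvRstripBS ((al.drop i).take size)).length := by ring
      have e2 : (j : Int) + (pvRstripBS ((al.drop i).take size)).length + bs_
          = bs_ + j + (pvRstripBS ((al.drop i).take size)).length := by ring
      rw [e1, e2]
      cases fuel with
      | zero =>
        dsimp only
        by_cases c4 : 2 < (pvRstripBS ((al.drop i).take size)).length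
        · rw [if_pos c4, if_pos c4]; simp
        · rw [if_neg c4, if_neg c4]; simp
      | succ f =>
        dsimp only
        rw [ihf f (by omega) _ _ _ ii jj _ _ _
          (gmb_bounds (al.drop (i + (pvRstripBS ((al.drop i).take size)).length))
            (bl.drop (j + (pvRstripBS ((al.drop i).take size)).length)))]
        by_cases c4 : 2 < (pvRstripBS ((al.drop i).take size)).length
        · rw [if_pos c4, if_pos c4]; simp
        · rw [if_neg c4, if_neg c4]; simp
    rw [if_neg c3, if_neg c3]
    by_cases c4 : 2 < size
    · rw [if_pos c4, if_pos c4]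
      rw [ihb al bl ii jj as_ bs_ _ hBr]
      simp
    · rw [if_neg c4, if_neg c4]
      exact ihb al bl ii jj as_ bs_ acc hBr

-- ===== VERDICT (by name: the statement is the Claim_ definition above) =====
theorem get_matched_obj_spec : Claim_equal_get_matched_obj := by
  intro a b i_idx j_idx a_start b_start _
  unfold Spec_get_matched_obj get_matched_obj get_matched_obj_alt
  rw [loop_eq _ _ _ _ _ _ _ _ _ (gmb_bounds a.toList b.toList), List.nil_append]
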